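-- pv_equiv track=rewrite | github.com/ImL1s/aigate | src/aigate/cli.py | _format_source_for_ai
-- ===== SOURCE A (Python) =====
-- def _format_source_for_ai(source_files: dict[str, str]) -> str:
--     """Format source files for AI prompt, prioritizing risky files."""
--     priority_patterns = [
--         "setup.py",
--         "setup.cfg",
--         "pyproject.toml",
--         "package.json",
--         "postinstall",
--         "preinstall",
--         ".pth",
--         "__init__.py",
--     ]
--
--     prioritized = []
--     rest = []
--     for path, content in source_files.items():
--         if any(p in path for p in priority_patterns):
--             prioritized.append((path, content))
--         else:
--             rest.append((path, content))
--
--     parts = []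
--     for path, content in prioritized + rest:
--         parts.append(f"### {path}\n```\n{content}\n```\n")
--
--     return "\n".join(parts)
-- ===== SOURCE B (Python) =====
-- def _format_source_for_ai(source_files: dict[str, str]) -> str:
--     """Format source files for AI prompt, prioritizing risky files."""
--     priority_patterns = [
--         "setup.py",
--         "setup.cfg",
--         "pyproject.toml",
--         "package.json",
--         "postinstall",
--         "preinstall",
--         ".pth",
--         "__init__.py",
--     ]
--     ordered = sorted(
--         source_files.items(),
--         key=lambda kv: 0 if any(p in kv[0] for p in priority_patterns) else 1,
--     )
--     return "\n".join(
--         f"### {path}\n```\n{content}\n```\n" for path, content in ordered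
--     )
-- ===== Notes on version B (the rewrite author's own statement) =====
-- stated objective: idiomatic
-- what changed: Replaces the two-accumulator partition loop plus a second parts-building loop with a single stable sort on a binary priority key and one join over a generator, relying on sort stability to preserve insertion order within each class.
import Mathlib
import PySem

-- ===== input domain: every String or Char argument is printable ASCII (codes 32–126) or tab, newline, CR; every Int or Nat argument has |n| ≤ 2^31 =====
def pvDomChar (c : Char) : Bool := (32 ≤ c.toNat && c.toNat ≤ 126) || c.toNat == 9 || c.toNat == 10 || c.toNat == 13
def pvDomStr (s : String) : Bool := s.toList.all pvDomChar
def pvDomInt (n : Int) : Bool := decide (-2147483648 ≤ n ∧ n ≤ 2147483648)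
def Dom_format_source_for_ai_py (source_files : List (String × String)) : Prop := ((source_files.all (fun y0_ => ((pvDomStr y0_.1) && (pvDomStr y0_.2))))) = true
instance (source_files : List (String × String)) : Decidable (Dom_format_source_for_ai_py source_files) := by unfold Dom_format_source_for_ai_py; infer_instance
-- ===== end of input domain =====

-- B replaces A's two-list partition + second loop by one stable sort on a binary priority key and one join (idiomatic, same result).

-- shared constants/format (identical literals in both Pythons)
def pvPriorityPatterns : List String :=
  ["setup.py", "setup.cfg", "pyproject.toml", "package.json",
   "postinstall", "preinstall", ".pth", "__init__.py"]

-- any(p in path for p in priority_patterns)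
def pvIsPriority (path : String) : Bool :=
  pvPriorityPatterns.any (fun p => PySem.Str.isIn p path)

-- f"### {path}\n```\n{content}\n```\n"
def pvFmt (pc : String × String) : String :=
  PySem.Str.join "" ["### ", pc.1, "\n```\n", pc.2, "\n```\n"]

-- ===== PORT A =====
def format_source_for_ai_py (source_files : List (String × String)) : String :=
  -- partition loop over items(), two accumulators, insertion order kept
  let pr := source_files.foldl
    (fun (acc : List (String × String) × List (String × String)) pc =>
      if pvIsPriority pc.1 then (acc.1 ++ [pc], acc.2) else (acc.1, acc.2 ++ [pc]))
    ([], [])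
  -- parts loop over prioritized + rest
  let parts := (pr.1 ++ pr.2).foldl (fun acc pc => acc ++ [pvFmt pc]) []
  PySem.Str.join "\n" parts

-- ===== PORT B =====
-- key kv = 0 if priority else 1
def pvKey (pc : String × String) : Int := if pvIsPriority pc.1 then 0 else 1

def format_source_for_ai_py_alt (source_files : List (String × String)) : String :=
  PySem.Str.join "\n" ((PySem.List.sorted source_files pvKey).map pvFmt)

-- ===== PRECONDITION & SPEC =====
def Spec_format_source_for_ai_py (source_files : List (String × String)) (out : String) : Prop := out = format_source_for_ai_py_alt source_files
instance (source_files : List (String × String)) (out : String) : Decidable (Spec_format_source_for_ai_py source_files out) := by unfold Spec_format_source_for_ai_py; infer_instance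

-- ===== CLAIM (what is proved, stated in full; the proofs are below) =====
def Claim_equal_format_source_for_ai_py : Prop := ∀ (source_files : List (String × String)), Dom_format_source_for_ai_py source_files → Spec_format_source_for_ai_py source_files (format_source_for_ai_py source_files)

-- ===== LEMMAS AND PROOFS =====

-- insertBy into a block of key-0 elements followed by key-1 elements: x with key 0 lands between them
theorem pv_insertBy_split (x : String × String) (F R : List (String × String))
    (hx : pvIsPriority x.1 = true)
    (hF : ∀ y ∈ F, pvIsPriority y.1 = true) (hR : ∀ y ∈ R, pvIsPriority y.1 = false) :
    PySem.List.insertBy (fun a b => decide (pvKey a < pvKey b)) x (F ++ R) = F ++ x :: R := by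
  induction F with
  | nil =>
    cases R with
    | nil => rfl
    | cons r rs =>
      have hr := hR r (by simp)
      simp [PySem.List.insertBy, pvKey, hx, hr]
  | cons f fs ih =>
    have hf := hF f (by simp)
    have hb : (fun a b => decide (pvKey a < pvKey b)) x f = false := by
      simp [pvKey, hx, hf]
    simp only [List.cons_append, PySem.List.insertBy, hb, Bool.false_eq_true, if_false]
    rw [ih (fun y hy => hF y (List.mem_cons_of_mem f hy))]

-- the insertion-sort fold on a binary key is exactly "priority prefix ++ rest", by stability
theorem pv_foldl_insertBy_binary (xs F R : List (String × String))
    (hF : ∀ y ∈ F, pvIsPriority y.1 = true) (hR : ∀ y ∈ R, pvIsPriority y.1 = false) :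
    xs.foldl (fun acc x => PySem.List.insertBy (fun a b => decide (pvKey a < pvKey b)) x acc) (F ++ R)
      = (F ++ xs.filter (fun pc => pvIsPriority pc.1)) ++ (R ++ xs.filter (fun pc => !pvIsPriority pc.1)) := by
  induction xs generalizing F R with
  | nil => simp
  | cons x xs ih =>
    by_cases hx : pvIsPriority x.1 = true
    · rw [List.foldl_cons, pv_insertBy_split x F R hx hF hR]
      have he : F ++ x :: R = (F ++ [x]) ++ R := by simp
      have hF' : ∀ y ∈ F ++ [x], pvIsPriority y.1 = true := by
        intro y hy
        rcases List.mem_append.1 hy with h | h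
        · exact hF y h
        · simp at h; subst h; exact hx
      rw [he, ih (F ++ [x]) R hF' hR]
      simp [hx]
    · have hx' : pvIsPriority x.1 = false := by simpa using hx
      have hnb : ∀ y ∈ F ++ R, (fun a b => decide (pvKey a < pvKey b)) x y = false := by
        intro y _
        have hxk : pvKey x = 1 := by simp [pvKey, hx']
        have hyk : pvKey y ≤ 1 := by unfold pvKey; split <;> omega
        simp only [decide_eq_false_iff_not, not_lt]
        omega
      rw [List.foldl_cons, PySem.List.insertBy_of_forall_not_before _ _ _ hnb]
      have he : (F ++ R) ++ [x] = F ++ (R ++ [x]) := by simp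
      have hR' : ∀ y ∈ R ++ [x], pvIsPriority y.1 = false := by
        intro y hy
        rcases List.mem_append.1 hy with h | h
        · exact hR y h
        · simp at h; subst h; exact hx'
      rw [he, ih F (R ++ [x]) hF hR']
      simp [hx']

-- A's partition fold computes the two filters
theorem pv_partition_fold (xs P Q : List (String × String)) :
    xs.foldl (fun (acc : List (String × String) × List (String × String)) pc =>
        if pvIsPriority pc.1 then (acc.1 ++ [pc], acc.2) else (acc.1, acc.2 ++ [pc])) (P, Q)
      = (P ++ xs.filter (fun pc => pvIsPriority pc.1), Q ++ xs.filter (fun pc => !pvIsPriority pc.1)) := by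
  induction xs generalizing P Q with
  | nil => simp
  | cons x xs ih =>
    by_cases hx : pvIsPriority x.1 = true
    · simp [List.foldl_cons, hx, ih]
    · have hx' : pvIsPriority x.1 = false := by simpa using hx
      simp [List.foldl_cons, hx', ih]

-- ===== VERDICT (by name: the statement is the Claim_ definition above) =====
theorem format_source_for_ai_py_spec : Claim_equal_format_source_for_ai_py := by
  intro source_files _
  unfold Spec_format_source_for_ai_py format_source_for_ai_py format_source_for_ai_py_alt
  rw [PySem.List.sorted_eq_foldl_insertBy]
  have hsort := pv_foldl_insertBy_binary source_files [] [] (by simp) (by simp)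
  simp only [List.nil_append] at hsort
  rw [hsort, pv_partition_fold source_files [] []]
  simp only [List.nil_append]
  rw [PySem.List.foldl_append_singleton_eq_map]
  simp
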